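-- pv_equiv track=rewrite | github.com/shvom667/CompetitiveProgramming | CF2032/E/good.py | Layer4
-- ===== SOURCE A (Python) =====
-- def Layer4(ap, sp, times, n):
--     # O(len(ap) + O(n))
--     # a[ap] += 1
--     # a[sp] -= 1
--     res = [0] * n
--     for i in range(len(ap)):
--         if ap[i] < sp[i]:
--             res[ap[i]] += times[i]
--             res[sp[i]] -= times[i]
--         else:
--             res[ap[i]] += times[i]
--             res[0] += times[i]
--             res[sp[i]] -= times[i]
--
--
--     for i in range(1, n):
--         res[i] += res[i - 1]
--
--
--     return res
-- ===== SOURCE B (Python) =====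
-- def Layer4(ap, sp, times, n):
--     # Direct range accumulation: add each update's amount to every index of its
--     # (possibly wrapping) range; no difference array, no prefix-sum pass.
--     res = [0] * n
--     for i in range(len(ap)):
--         a, s, t = ap[i], sp[i], times[i]
--         if a < s:
--             for j in range(a, s):
--                 res[j] += t
--         else:
--             for j in range(a, n):
--                 res[j] += t
--             for j in range(0, s):
--                 res[j] += t
--     return res
-- ===== Notes on version B (the rewrite author's own statement) =====
-- stated objective: alternative
-- what changed: Replaces the difference-array endpoint writes plus a final prefix-sum sweep by direct range accumulation: each update adds its amount to every index of its (possibly wrapping) range with explicit inner loops, and no prefix pass exists.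
-- intended difference: On inputs where some update has a nonzero amount and a negative start/stop index that is not part of an ascending all-negative pair, A returns values produced by Python's accidental negative-index wraparound of its two difference-array endpoint writes (e.g. ([-1],[1],[5],2) -> [0,0]), while B adds the amount to every position the wrapped range actually covers ([5,5] there), the intended circular range update. — e.g. on Layer4([-1], [1], [5], 2): A returns [0, 0], B returns [5, 5]
import Mathlib
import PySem

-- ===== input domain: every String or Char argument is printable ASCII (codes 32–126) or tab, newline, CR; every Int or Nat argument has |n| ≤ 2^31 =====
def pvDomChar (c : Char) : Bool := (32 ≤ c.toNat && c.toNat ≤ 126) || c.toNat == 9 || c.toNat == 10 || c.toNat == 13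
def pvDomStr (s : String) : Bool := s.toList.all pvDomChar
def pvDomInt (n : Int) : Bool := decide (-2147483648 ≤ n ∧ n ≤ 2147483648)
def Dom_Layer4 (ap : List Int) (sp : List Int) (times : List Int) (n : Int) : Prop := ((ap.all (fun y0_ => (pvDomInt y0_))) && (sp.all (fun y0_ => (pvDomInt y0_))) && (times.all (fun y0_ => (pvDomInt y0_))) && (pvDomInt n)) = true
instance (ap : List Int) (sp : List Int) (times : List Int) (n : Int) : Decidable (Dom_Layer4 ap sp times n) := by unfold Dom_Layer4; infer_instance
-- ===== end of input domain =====

-- B replaces A's difference-array writes + prefix-sum sweep by direct per-update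
-- range accumulation (alternative decomposition, not claimed faster).


-- ===== PORT A =====
-- Python index normalization (negative index wraps once)
def pyIdx (len : Nat) (i : Int) : Int := if i < 0 then i + (len : Int) else i

-- Python `res[i] += t`: exact for -len ≤ i < len; out of that range Python raises
-- IndexError (excluded by Pre_), here: no-op.
def pyAddAt (res : List Int) (i : Int) (t : Int) : List Int :=
  if 0 ≤ pyIdx res.length i ∧ pyIdx res.length i < (res.length : Int) then
    res.set (pyIdx res.length i).toNat (res.getD (pyIdx res.length i).toNat 0 + t)
  else res

-- body of A's first loop: the difference-array endpoint writes of update i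
def stepA (ap sp times : List Int) (res : List Int) (i : Nat) : List Int :=
  if ap.getD i 0 < sp.getD i 0 then
    pyAddAt (pyAddAt res (ap.getD i 0) (times.getD i 0)) (sp.getD i 0) (-(times.getD i 0))
  else
    pyAddAt (pyAddAt (pyAddAt res (ap.getD i 0) (times.getD i 0)) 0 (times.getD i 0))
      (sp.getD i 0) (-(times.getD i 0))

-- body of A's second loop: res[i] += res[i-1]
def stepP (res : List Int) (i : Nat) : List Int :=
  res.set i (res.getD i 0 + res.getD (i - 1) 0)

def Layer4 (ap : List Int) (sp : List Int) (times : List Int) (n : Int) : List Int :=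
  -- res = [0] * n; for i in range(len(ap)): endpoint writes
  let d := (List.range ap.length).foldl (stepA ap sp times) (List.replicate n.toNat 0)
  -- for i in range(1, n): res[i] += res[i-1]
  (List.range' 1 (n.toNat - 1)).foldl stepP d

-- ===== PORT B =====
-- inner loop `for j in range(a, s): res[j] += t`
def addRange (res : List Int) (a s t : Int) : List Int :=
  (PySem.List.pyRange a s).foldl (fun r j => pyAddAt r j t) res

-- body of B's loop: walk update i's (possibly wrapping) range, adding t at each index
def stepB (ap sp times : List Int) (n : Int) (res : List Int) (i : Nat) : List Int :=
  if ap.getD i 0 < sp.getD i 0 then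
    addRange res (ap.getD i 0) (sp.getD i 0) (times.getD i 0)
  else
    addRange (addRange res (ap.getD i 0) n (times.getD i 0)) 0 (sp.getD i 0) (times.getD i 0)

def Layer4_alt (ap : List Int) (sp : List Int) (times : List Int) (n : Int) : List Int :=
  (List.range ap.length).foldl (stepB ap sp times n) (List.replicate n.toNat 0)

-- ===== PRECONDITION & SPEC =====
-- Pre_ admits exactly the inputs on which A returns: every update's start/stop
-- index lies in [-n, n) (Python list indexing accepts these) and sp/times are at
-- least as long as ap; outside it A raises IndexError.
def Pre_Layer4 (ap : List Int) (sp : List Int) (times : List Int) (n : Int) : Prop :=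
  ap.length ≤ sp.length ∧ ap.length ≤ times.length ∧
  ∀ i < ap.length, -n ≤ ap.getD i 0 ∧ ap.getD i 0 < n ∧ -n ≤ sp.getD i 0 ∧ sp.getD i 0 < n
instance (ap : List Int) (sp : List Int) (times : List Int) (n : Int) : Decidable (Pre_Layer4 ap sp times n) := by unfold Pre_Layer4; infer_instance

def pvWitness_Layer4 : List Int × List Int × List Int × Int := ([0, 1], [1, 0], [2, 3], 2)

-- On inputs where some update has a nonzero amount and a negative index that is not
-- part of an ascending all-negative pair, A returns values produced by Python's
-- accidental negative-index wraparound of its two difference-array endpoint writes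
-- (at the witness below A returns [0, 0]), while B adds the amount to every position
-- the wrapped range actually covers ([5, 5] there) — the intended circular range update.
def D_Layer4 (ap : List Int) (sp : List Int) (times : List Int) (_n : Int) : Prop :=
  ∃ i < ap.length, times.getD i 0 ≠ 0 ∧ (ap.getD i 0 < 0 ∨ sp.getD i 0 < 0) ∧
    ¬(ap.getD i 0 < 0 ∧ sp.getD i 0 < 0 ∧ ap.getD i 0 < sp.getD i 0)
instance (ap : List Int) (sp : List Int) (times : List Int) (n : Int) : Decidable (D_Layer4 ap sp times n) := by unfold D_Layer4; infer_instance

def Spec_Layer4 (ap : List Int) (sp : List Int) (times : List Int) (n : Int) (out : List Int) : Prop := ¬ D_Layer4 ap sp times n → out = Layer4_alt ap sp times n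
instance (ap : List Int) (sp : List Int) (times : List Int) (n : Int) (out : List Int) : Decidable (Spec_Layer4 ap sp times n out) := by unfold Spec_Layer4; infer_instance

def pvDiffWitness_Layer4 : List Int × List Int × List Int × Int := ([-1], [1], [5], 2)
def pvDiffWitnessOut_Layer4 : (List Int) × (List Int) := ([0, 0], [5, 5])

-- ===== CLAIM (what is proved, stated in full; the proofs are below) =====
def Claim_unchanged_Layer4 : Prop := ∀ (ap : List Int) (sp : List Int) (times : List Int) (n : Int), Dom_Layer4 ap sp times n → Pre_Layer4 ap sp times n → Spec_Layer4 ap sp times n (Layer4 ap sp times n)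
def Claim_changed_Layer4 : Prop := Dom_Layer4 (pvDiffWitness_Layer4.1) (pvDiffWitness_Layer4.2.1) (pvDiffWitness_Layer4.2.2.1) (pvDiffWitness_Layer4.2.2.2) ∧ Pre_Layer4 (pvDiffWitness_Layer4.1) (pvDiffWitness_Layer4.2.1) (pvDiffWitness_Layer4.2.2.1) (pvDiffWitness_Layer4.2.2.2) ∧ D_Layer4 (pvDiffWitness_Layer4.1) (pvDiffWitness_Layer4.2.1) (pvDiffWitness_Layer4.2.2.1) (pvDiffWitness_Layer4.2.2.2) ∧ Layer4 (pvDiffWitness_Layer4.1) (pvDiffWitness_Layer4.2.1) (pvDiffWitness_Layer4.2.2.1) (pvDiffWitness_Layer4.2.2.2) = pvDiffWitnessOut_Layer4.1 ∧ Layer4_alt (pvDiffWitness_Layer4.1) (pvDiffWitness_Layer4.2.1) (pvDiffWitness_Layer4.2.2.1) (pvDiffWitness_Layer4.2.2.2) = pvDiffWitnessOut_Layer4.2 ∧ pvDiffWitnessOut_Layer4.1 ≠ pvDiffWitnessOut_Layer4.2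

-- ===== LEMMAS AND PROOFS =====

-- normalized (wrapped) position of a Python index relative to length n
def normI (n x : Int) : Int := if x < 0 then x + n else x

-- contribution of one normalized update (a, s, t) to index j (what B adds there)
def contrib (u : Int × Int × Int) (j : Int) : Int :=
  if u.1 < u.2.1 then (if u.1 ≤ j ∧ j < u.2.1 then u.2.2 else 0)
  else (if j < u.2.1 ∨ u.1 ≤ j then u.2.2 else 0)

-- difference-array delta of one normalized update at index j (A's first loop)
def delta (u : Int × Int × Int) (j : Int) : Int :=
  (if j = u.1 then u.2.2 else 0) +
  (if ¬ u.1 < u.2.1 ∧ j = 0 then u.2.2 else 0) +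
  (if j = u.2.1 then -u.2.2 else 0)

theorem sum_map_add {α : Type} (l : List α) (f g : α → Int) :
    (l.map (fun x => f x + g x)).sum = (l.map f).sum + (l.map g).sum := by
  induction l with
  | nil => simp
  | cons a l ih => simp only [List.map_cons, List.sum_cons, ih]; ring

theorem sum_map_zero {α : Type} (l : List α) :
    (l.map (fun _ => (0 : Int))).sum = 0 := by
  induction l with
  | nil => simp
  | cons a l ih => simp only [List.map_cons, List.sum_cons, ih, add_zero]

theorem list_sum_comm (f : Nat → Nat → Int) (a b : Nat) :
    ((List.range a).map (fun k => ((List.range b).map (fun i => f k i)).sum)).sum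
      = ((List.range b).map (fun i => ((List.range a).map (fun k => f k i)).sum)).sum := by
  induction a with
  | zero =>
      simp only [List.range_zero, List.map_nil, List.sum_nil]
      exact (sum_map_zero _).symm
  | succ a ih =>
      rw [List.range_succ, List.map_append, List.sum_append, ih]
      simp only [List.map_append, List.sum_append, List.map_cons, List.map_nil,
        List.sum_cons, List.sum_nil, add_zero, sum_map_add]

-- summing the delta of one normalized update over 0..j gives its contribution at j
theorem delta_sum_eq (a s t : Int) (ha : 0 ≤ a) (hs : 0 ≤ s) (j : Nat) :
    ((List.range (j + 1)).map (fun (k : Nat) => delta (a, s, t) (k : Int))).sum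
      = contrib (a, s, t) (j : Int) := by
  induction j with
  | zero =>
      have h1 : (0 : Nat) + 1 = 1 := rfl
      rw [h1, List.range_one]
      simp only [List.map_cons, List.map_nil, List.sum_cons, List.sum_nil, delta, contrib]
      push_cast
      try simp only [and_true]
      split_ifs <;> omega
  | succ j ih =>
      rw [List.range_succ, List.map_append, List.sum_append, ih]
      simp only [List.map_cons, List.map_nil, List.sum_cons, List.sum_nil, delta, contrib]
      push_cast
      try simp only [and_true]
      split_ifs <;> omega

-- ----- pyAddAt -----
theorem pyAddAt_length (res : List Int) (i t : Int) :
    (pyAddAt res i t).length = res.length := by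
  unfold pyAddAt
  split <;> simp

theorem pyAddAt_getD (res : List Int) (i t : Int) (hi : -(res.length : Int) ≤ i)
    (hi2 : i < (res.length : Int)) (j : Nat) :
    (pyAddAt res i t).getD j 0
      = res.getD j 0 + (if (j : Int) = pyIdx res.length i then t else 0) := by
  have hk : 0 ≤ pyIdx res.length i ∧ pyIdx res.length i < (res.length : Int) := by
    unfold pyIdx; split <;> omega
  have hlt : (pyIdx res.length i).toNat < res.length := by omega
  unfold pyAddAt
  rw [if_pos hk]
  by_cases hj : j < res.length
  · rw [List.getD_eq_getElem _ 0 (by simpa using hj), List.getElem_set]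
    by_cases hij : (pyIdx res.length i).toNat = j
    · subst hij
      rw [if_pos rfl, if_pos (by omega), List.getD_eq_getElem res 0 hlt]
    · rw [if_neg hij, if_neg (by omega), add_zero, List.getD_eq_getElem res 0 hj]
  · have hjlen : res.length ≤ j := by omega
    rw [List.getD_eq_default _ _ (by simpa using hjlen), List.getD_eq_default _ _ hjlen,
      if_neg (by omega), add_zero]

theorem pyAddAt_zero_getD (res : List Int) (i : Int) (j : Nat) :
    (pyAddAt res i 0).getD j 0 = res.getD j 0 := by
  by_cases h : -(res.length : Int) ≤ i ∧ i < (res.length : Int)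
  · rw [pyAddAt_getD res i 0 h.1 h.2 j]
    split_ifs <;> omega
  · have hcond : ¬ (0 ≤ pyIdx res.length i ∧ pyIdx res.length i < (res.length : Int)) := by
      unfold pyIdx
      split_ifs <;> omega
    unfold pyAddAt
    rw [if_neg hcond]

-- ----- B-side: addRange -----
theorem addRange_length (res : List Int) (a s t : Int) :
    (addRange res a s t).length = res.length := by
  unfold addRange
  generalize PySem.List.pyRange a s = l
  induction l generalizing res with
  | nil => rfl
  | cons x l ih => simp only [List.foldl_cons]; rw [ih, pyAddAt_length]

theorem addRange_zero_getD (res : List Int) (a s : Int) (j : Nat) :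
    (addRange res a s 0).getD j 0 = res.getD j 0 := by
  unfold addRange
  generalize PySem.List.pyRange a s = l
  induction l generalizing res with
  | nil => rfl
  | cons x l ih => simp only [List.foldl_cons]; rw [ih, pyAddAt_zero_getD]

-- a range walk over nonnegative positions
theorem addRange_getD (s t : Int) (k : Nat) :
    ∀ (a : Int) (res : List Int), 0 ≤ a → s ≤ (res.length : Int) → (s - a).toNat = k →
      ∀ j : Nat, (addRange res a s t).getD j 0
        = res.getD j 0 + (if a ≤ (j : Int) ∧ (j : Int) < s then t else 0) := by
  induction k with
  | zero =>
      intro a res ha hs hk j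
      unfold addRange
      rw [PySem.List.pyRange_one, (by omega : (s - a).toNat = 0), List.range_zero,
        List.map_nil, List.foldl_nil, if_neg (by omega), add_zero]
  | succ k ih =>
      intro a res ha hs hk j
      have has : a < s := by omega
      unfold addRange
      rw [PySem.List.pyRange_one_cons has, List.foldl_cons]
      have := ih (a + 1) (pyAddAt res a t) (by omega) (by rw [pyAddAt_length]; exact hs)
        (by omega) j
      unfold addRange at this
      rw [this, pyAddAt_getD res a t (by omega) (by omega) j]
      have hpy : pyIdx res.length a = a := by unfold pyIdx; split <;> omega
      rw [hpy]
      split_ifs <;> omega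

-- a range walk over all-negative positions (each write wraps by the length)
theorem addRange_getD_neg (s t : Int) (k : Nat) :
    ∀ (a : Int) (res : List Int), -(res.length : Int) ≤ a → s ≤ 0 → (s - a).toNat = k →
      ∀ j : Nat, (addRange res a s t).getD j 0
        = res.getD j 0 + (if a + (res.length : Int) ≤ (j : Int)
            ∧ (j : Int) < s + (res.length : Int) then t else 0) := by
  induction k with
  | zero =>
      intro a res ha hs hk j
      unfold addRange
      rw [PySem.List.pyRange_one, (by omega : (s - a).toNat = 0), List.range_zero,
        List.map_nil, List.foldl_nil, if_neg (by omega), add_zero]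
  | succ k ih =>
      intro a res ha hs hk j
      have has : a < s := by omega
      have ha0 : a < 0 := by omega
      unfold addRange
      rw [PySem.List.pyRange_one_cons has, List.foldl_cons]
      have := ih (a + 1) (pyAddAt res a t) (by rw [pyAddAt_length]; omega) hs
        (by omega) j
      unfold addRange at this
      rw [this, pyAddAt_getD res a t (by omega) (by omega) j]
      have hpy : pyIdx res.length a = a + (res.length : Int) := by
        unfold pyIdx; split <;> omega
      rw [hpy, pyAddAt_length]
      split_ifs <;> omega

-- ----- per-update effect of B's loop body -----
theorem stepB_getD (ap sp times : List Int) (n : Int) (res : List Int) (i : Nat)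
    (hlen : (res.length : Int) = n)
    (hb : -n ≤ ap.getD i 0 ∧ ap.getD i 0 < n ∧ -n ≤ sp.getD i 0 ∧ sp.getD i 0 < n)
    (hok : times.getD i 0 = 0 ∨ (0 ≤ ap.getD i 0 ∧ 0 ≤ sp.getD i 0)
      ∨ (ap.getD i 0 < 0 ∧ sp.getD i 0 < 0 ∧ ap.getD i 0 < sp.getD i 0))
    (j : Nat) (hj : (j : Int) < n) :
    (stepB ap sp times n res i).getD j 0
      = res.getD j 0
        + contrib (normI n (ap.getD i 0), normI n (sp.getD i 0), times.getD i 0) (j : Int) := by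
  obtain ⟨hb1, hb2, hb3, hb4⟩ := hb
  have hn1 : (0 : Int) < n := by omega
  unfold stepB contrib
  simp only
  rcases hok with h0 | h0 | h0
  · -- zero amount: both sides unchanged
    rw [h0]
    by_cases hc : ap.getD i 0 < sp.getD i 0
    · rw [if_pos hc, addRange_zero_getD]
      unfold normI
      split_ifs <;> omega
    · rw [if_neg hc, addRange_zero_getD, addRange_zero_getD]
      unfold normI
      split_ifs <;> omega
  · -- both indices nonnegative: the plain range walk
    by_cases hc : ap.getD i 0 < sp.getD i 0
    · rw [if_pos hc,
        addRange_getD (sp.getD i 0) (times.getD i 0) (sp.getD i 0 - ap.getD i 0).toNat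
          (ap.getD i 0) res h0.1 (by omega) rfl j]
      unfold normI
      split_ifs <;> omega
    · rw [if_neg hc,
        addRange_getD (sp.getD i 0) (times.getD i 0) (sp.getD i 0).toNat 0 _ le_rfl
          (by rw [addRange_length]; omega) (by omega) j,
        addRange_getD n (times.getD i 0) (n - ap.getD i 0).toNat (ap.getD i 0) res h0.1
          (by omega) rfl j]
      unfold normI
      split_ifs <;> omega
  · -- ascending all-negative range: every write wraps by n
    have hc : ap.getD i 0 < sp.getD i 0 := h0.2.2
    rw [if_pos hc,
      addRange_getD_neg (sp.getD i 0) (times.getD i 0)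
        (sp.getD i 0 - ap.getD i 0).toNat (ap.getD i 0) res (by omega) (by omega) rfl j,
      hlen]
    unfold normI
    split_ifs <;> omega

theorem stepB_length (ap sp times : List Int) (n : Int) (res : List Int) (i : Nat) :
    (stepB ap sp times n res i).length = res.length := by
  unfold stepB
  split <;> simp [addRange_length]

theorem foldB_length (ap sp times : List Int) (n : Int) (l : List Nat) (res : List Int) :
    (l.foldl (stepB ap sp times n) res).length = res.length := by
  induction l generalizing res with
  | nil => rfl
  | cons x l ih => simp only [List.foldl_cons]; rw [ih, stepB_length]

theorem foldB_getD (ap sp times : List Int) (n : Int)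
    (hpre : ∀ i < ap.length,
      (-n ≤ ap.getD i 0 ∧ ap.getD i 0 < n ∧ -n ≤ sp.getD i 0 ∧ sp.getD i 0 < n)
      ∧ (times.getD i 0 = 0 ∨ (0 ≤ ap.getD i 0 ∧ 0 ≤ sp.getD i 0)
          ∨ (ap.getD i 0 < 0 ∧ sp.getD i 0 < 0 ∧ ap.getD i 0 < sp.getD i 0)))
    (m : Nat) (hm : m ≤ ap.length) (res : List Int) (hlen : (res.length : Int) = n)
    (j : Nat) (hj : (j : Int) < n) :
    ((List.range m).foldl (stepB ap sp times n) res).getD j 0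
      = res.getD j 0 + ((List.range m).map (fun (i : Nat) =>
          contrib (normI n (ap.getD i 0), normI n (sp.getD i 0), times.getD i 0) (j : Int))).sum := by
  induction m with
  | zero => simp
  | succ m ih =>
      obtain ⟨hb, hok⟩ := hpre m (by omega)
      rw [List.range_succ, List.foldl_append, List.foldl_cons, List.foldl_nil,
        stepB_getD ap sp times n _ m (by rw [foldB_length]; exact hlen) hb hok j hj,
        ih (by omega), List.map_append, List.sum_append]
      simp only [List.map_cons, List.map_nil, List.sum_cons, List.sum_nil, add_zero]
      ring

-- ----- per-update effect of A's first loop body -----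
theorem stepA_length (ap sp times res : List Int) (i : Nat) :
    (stepA ap sp times res i).length = res.length := by
  unfold stepA
  split <;> simp [pyAddAt_length]

theorem stepA_getD (ap sp times res : List Int) (i : Nat) (n : Int)
    (hlen : (res.length : Int) = n)
    (hb : -n ≤ ap.getD i 0 ∧ ap.getD i 0 < n ∧ -n ≤ sp.getD i 0 ∧ sp.getD i 0 < n)
    (hok : times.getD i 0 = 0 ∨ (0 ≤ ap.getD i 0 ∧ 0 ≤ sp.getD i 0)
      ∨ (ap.getD i 0 < 0 ∧ sp.getD i 0 < 0 ∧ ap.getD i 0 < sp.getD i 0))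
    (j : Nat) :
    (stepA ap sp times res i).getD j 0
      = res.getD j 0
        + delta (normI n (ap.getD i 0), normI n (sp.getD i 0), times.getD i 0) (j : Int) := by
  obtain ⟨hb1, hb2, hb3, hb4⟩ := hb
  have hn1 : (0 : Int) < n := by omega
  have hpa : pyIdx res.length (ap.getD i 0) = normI n (ap.getD i 0) := by
    unfold pyIdx normI; split_ifs <;> omega
  have hps : pyIdx res.length (sp.getD i 0) = normI n (sp.getD i 0) := by
    unfold pyIdx normI; split_ifs <;> omega
  unfold stepA delta
  simp only
  by_cases hc : ap.getD i 0 < sp.getD i 0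
  · -- raw ascending branch: the two endpoint writes
    have hax : times.getD i 0 = 0
        ∨ normI n (ap.getD i 0) < normI n (sp.getD i 0) := by
      rcases hok with h0 | h0 | h0
      · exact Or.inl h0
      · refine Or.inr ?_; unfold normI; split_ifs <;> omega
      · refine Or.inr ?_; unfold normI; split_ifs <;> omega
    rw [if_pos hc,
      pyAddAt_getD _ (sp.getD i 0) _ (by rw [pyAddAt_length]; omega)
        (by rw [pyAddAt_length]; omega) j,
      pyAddAt_getD res (ap.getD i 0) _ (by omega) (by omega) j]
    simp only [pyAddAt_length]
    rw [hpa, hps]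
    rcases hax with hax | hax <;> split_ifs <;> omega
  · -- raw descending branch: the extra write at position 0
    have hax : times.getD i 0 = 0
        ∨ ¬ normI n (ap.getD i 0) < normI n (sp.getD i 0) := by
      rcases hok with h0 | h0 | h0
      · exact Or.inl h0
      · refine Or.inr ?_; unfold normI; split_ifs <;> omega
      · omega
    rw [if_neg hc,
      pyAddAt_getD _ (sp.getD i 0) _
        (by rw [pyAddAt_length, pyAddAt_length]; omega)
        (by rw [pyAddAt_length, pyAddAt_length]; omega) j,
      pyAddAt_getD _ 0 _ (by rw [pyAddAt_length]; omega) (by rw [pyAddAt_length]; omega) j,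
      pyAddAt_getD res (ap.getD i 0) _ (by omega) (by omega) j]
    simp only [pyAddAt_length]
    rw [hpa, hps]
    have hpz : ∀ m : Nat, pyIdx m 0 = 0 := by
      intro m; unfold pyIdx; split <;> omega
    rw [hpz]
    rcases hax with hax | hax <;> split_ifs <;> omega

theorem foldA_length (ap sp times : List Int) (l : List Nat) (res : List Int) :
    (l.foldl (stepA ap sp times) res).length = res.length := by
  induction l generalizing res with
  | nil => rfl
  | cons x l ih => simp only [List.foldl_cons]; rw [ih, stepA_length]

theorem foldA_getD (ap sp times : List Int) (n : Int)
    (hpre : ∀ i < ap.length,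
      (-n ≤ ap.getD i 0 ∧ ap.getD i 0 < n ∧ -n ≤ sp.getD i 0 ∧ sp.getD i 0 < n)
      ∧ (times.getD i 0 = 0 ∨ (0 ≤ ap.getD i 0 ∧ 0 ≤ sp.getD i 0)
          ∨ (ap.getD i 0 < 0 ∧ sp.getD i 0 < 0 ∧ ap.getD i 0 < sp.getD i 0)))
    (m : Nat) (hm : m ≤ ap.length) (res : List Int) (hlen : (res.length : Int) = n)
    (j : Nat) :
    ((List.range m).foldl (stepA ap sp times) res).getD j 0
      = res.getD j 0 + ((List.range m).map (fun (i : Nat) =>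
          delta (normI n (ap.getD i 0), normI n (sp.getD i 0), times.getD i 0) (j : Int))).sum := by
  induction m with
  | zero => simp
  | succ m ih =>
      rw [List.range_succ, List.foldl_append, List.foldl_cons, List.foldl_nil,
        stepA_getD ap sp times _ m n (by rw [foldA_length]; exact hlen)
          (hpre m (by omega)).1 (hpre m (by omega)).2 j,
        ih (by omega), List.map_append, List.sum_append]
      simp only [List.map_cons, List.map_nil, List.sum_cons, List.sum_nil, add_zero]
      ring

-- ----- A-side: prefix pass -----
theorem foldP_length (l : List Nat) (res : List Int) :
    (l.foldl stepP res).length = res.length := by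
  induction l generalizing res with
  | nil => rfl
  | cons x l ih => simp only [List.foldl_cons]; rw [ih]; simp [stepP]

theorem prefix_getD (d : List Int) (m : Nat) (hm : m + 1 ≤ d.length) :
    ∀ j : Nat, j < d.length →
      ((List.range' 1 m).foldl stepP d).getD j 0
        = if j ≤ m then ((List.range (j + 1)).map (fun (k : Nat) => d.getD k 0)).sum
          else d.getD j 0 := by
  induction m with
  | zero =>
      intro j hj
      simp only [List.range'_zero, List.foldl_nil]
      split_ifs with h
      · have hj0 : j = 0 := by omega
        subst hj0
        have h1 : (0 : Nat) + 1 = 1 := rfl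
        rw [h1, List.range_one]
        simp
      · rfl
  | succ m ih =>
      intro j hj
      have hm' : m + 1 ≤ d.length := by omega
      have ih' := ih hm'
      have hconcat : List.range' 1 (m + 1) = List.range' 1 m ++ [m + 1] := by
        rw [List.range'_concat]
        norm_num
        omega
      rw [hconcat, List.foldl_append, List.foldl_cons, List.foldl_nil]
      have hplen : ((List.range' 1 m).foldl stepP d).length = d.length := foldP_length _ _
      have hm1 : m + 1 < d.length := by omega
      have hstep : stepP ((List.range' 1 m).foldl stepP d) (m + 1)
          = ((List.range' 1 m).foldl stepP d).set (m + 1)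
              (((List.range' 1 m).foldl stepP d).getD (m + 1) 0
                + ((List.range' 1 m).foldl stepP d).getD (m + 1 - 1) 0) := rfl
      rw [hstep]
      have hget1 : ((List.range' 1 m).foldl stepP d).getD (m + 1) 0 = d.getD (m + 1) 0 := by
        rw [ih' (m + 1) hm1, if_neg (by omega)]
      have hget2 : ((List.range' 1 m).foldl stepP d).getD (m + 1 - 1) 0
          = ((List.range (m + 1)).map (fun (k : Nat) => d.getD k 0)).sum := by
        have he : m + 1 - 1 = m := by omega
        rw [he, ih' m (by omega), if_pos (le_refl m)]
      rw [List.getD_eq_getElem _ 0 (by simp [hplen]; omega), List.getElem_set]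
      by_cases hje : m + 1 = j
      · subst hje
        have hr2 : List.range (m + 1 + 1) = List.range (m + 1) ++ [m + 1] :=
          List.range_succ
        rw [if_pos rfl, if_pos (le_refl _), hget1, hget2, hr2,
          List.map_append, List.sum_append]
        simp only [List.map_cons, List.map_nil, List.sum_cons, List.sum_nil, add_zero]
        omega
      · rw [if_neg hje, ← List.getD_eq_getElem _ 0 (by omega), ih' j hj]
        by_cases hjm : j ≤ m
        · rw [if_pos hjm, if_pos (by omega)]
        · rw [if_neg hjm, if_neg (by omega)]

theorem replicate_getD (m k : Nat) : (List.replicate m (0 : Int)).getD k 0 = 0 := by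
  by_cases h : k < m
  · rw [List.getD_eq_getElem _ 0 (by simpa using h), List.getElem_replicate]
  · rw [List.getD_eq_default _ _ (by simpa using h)]

-- ===== VERDICT (by name: the statement is the Claim_ definition above) =====
theorem Layer4_spec : Claim_unchanged_Layer4 := by
  intro ap sp times n _ hpre
  unfold Spec_Layer4
  intro hnD
  obtain ⟨hsp, ht, hidx⟩ := hpre
  have hall : ∀ i < ap.length,
      (-n ≤ ap.getD i 0 ∧ ap.getD i 0 < n ∧ -n ≤ sp.getD i 0 ∧ sp.getD i 0 < n)
      ∧ (times.getD i 0 = 0 ∨ (0 ≤ ap.getD i 0 ∧ 0 ≤ sp.getD i 0)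
          ∨ (ap.getD i 0 < 0 ∧ sp.getD i 0 < 0 ∧ ap.getD i 0 < sp.getD i 0)) := by
    intro i hi
    refine ⟨hidx i hi, ?_⟩
    unfold D_Layer4 at hnD
    by_contra hbad
    exact hnD ⟨i, hi, by omega⟩
  unfold Layer4 Layer4_alt
  simp only
  have hr0len : (List.replicate n.toNat (0 : Int)).length = n.toNat := by simp
  apply List.ext_getElem
  · rw [foldP_length, foldA_length, hr0len, foldB_length, hr0len]
  · intro j h1 h2
    have hjn : j < n.toNat := by rwa [foldB_length, hr0len] at h2
    have hnn : (0 : Int) < n := by omega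
    rw [← List.getD_eq_getElem _ 0 h1, ← List.getD_eq_getElem _ 0 h2]
    -- B side
    rw [foldB_getD ap sp times n hall ap.length le_rfl _ (by rw [hr0len]; omega) j
        (by omega),
      replicate_getD, zero_add]
    -- A side: the second loop is a prefix sum …
    rw [prefix_getD _ (n.toNat - 1) (by rw [foldA_length, hr0len]; omega) j
        (by rw [foldA_length, hr0len]; omega),
      if_pos (by omega : j ≤ n.toNat - 1)]
    -- … of the accumulated deltas
    have hdg : ∀ k ∈ List.range (j + 1),
        ((List.range ap.length).foldl (stepA ap sp times) (List.replicate n.toNat 0)).getD k 0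
          = ((List.range ap.length).map (fun (i : Nat) =>
              delta (normI n (ap.getD i 0), normI n (sp.getD i 0), times.getD i 0)
                (k : Int))).sum := by
      intro k _
      rw [foldA_getD ap sp times n hall ap.length le_rfl _ (by rw [hr0len]; omega) k,
        replicate_getD, zero_add]
    rw [List.map_congr_left hdg,
      list_sum_comm (fun k i =>
        delta (normI n (ap.getD i 0), normI n (sp.getD i 0), times.getD i 0) (k : Int))
        (j + 1) ap.length]
    refine congrArg List.sum (List.map_congr_left ?_)
    intro i hi
    obtain ⟨⟨hb1, hb2, hb3, hb4⟩, _⟩ := hall i (List.mem_range.mp hi)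
    exact delta_sum_eq _ _ _ (by unfold normI; split <;> omega)
      (by unfold normI; split <;> omega) j

theorem Layer4_changed : Claim_changed_Layer4 := by
  unfold Claim_changed_Layer4
  decide
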